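-- pv_equiv track=rewrite | github.com/echoxiangzhou/LearningEnglish | backend/app/services/dictation_service.py | _get_phonetic_spelling
-- ===== SOURCE A (Python) =====
-- def _get_phonetic_spelling(word: str) -> str:
--     """Get phonetic spelling of a word"""
--     # Simplified phonetic representation
--     # In production, use a proper phonetic dictionary
--     phonetic_map = {
--         'a': 'æ', 'e': 'ɛ', 'i': 'ɪ', 'o': 'ɒ', 'u': 'ʌ',
--         'th': 'θ', 'sh': 'ʃ', 'ch': 'tʃ', 'ng': 'ŋ'
--     }
--
--     result = word.lower()
--     for key, value in phonetic_map.items():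
--         result = result.replace(key, value)
--
--     return f"/{result}/"
-- ===== SOURCE B (Python) =====
-- def _get_phonetic_spelling(word: str) -> str:
--     """Get phonetic spelling of a word (single left-to-right scan)."""
--     w = word.lower()
--     out = []
--     i = 0
--     n = len(w)
--     while i < n:
--         two = w[i:i+2]
--         if two == 'th':
--             out.append('θ'); i += 2
--         elif two == 'sh':
--             out.append('ʃ'); i += 2
--         elif two == 'ch':
--             out.append('tʃ'); i += 2
--         elif two == 'ng':
--             out.append('ŋ'); i += 2
--         else:
--             c = w[i]
--             if c == 'a':
--                 out.append('æ')
--             elif c == 'e':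
--                 out.append('ɛ')
--             elif c == 'i':
--                 out.append('ɪ')
--             elif c == 'o':
--                 out.append('ɒ')
--             elif c == 'u':
--                 out.append('ʌ')
--             else:
--                 out.append(c)
--             i += 1
--     return '/' + ''.join(out) + '/'
-- ===== Notes on version B (the rewrite author's own statement) =====
-- stated objective: alternative
-- what changed: Replaced the nine sequential whole-string .replace passes by one left-to-right scan that matches a two-char digraph window or maps a single vowel at each position, building the output in a single pass.
import Mathlib
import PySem

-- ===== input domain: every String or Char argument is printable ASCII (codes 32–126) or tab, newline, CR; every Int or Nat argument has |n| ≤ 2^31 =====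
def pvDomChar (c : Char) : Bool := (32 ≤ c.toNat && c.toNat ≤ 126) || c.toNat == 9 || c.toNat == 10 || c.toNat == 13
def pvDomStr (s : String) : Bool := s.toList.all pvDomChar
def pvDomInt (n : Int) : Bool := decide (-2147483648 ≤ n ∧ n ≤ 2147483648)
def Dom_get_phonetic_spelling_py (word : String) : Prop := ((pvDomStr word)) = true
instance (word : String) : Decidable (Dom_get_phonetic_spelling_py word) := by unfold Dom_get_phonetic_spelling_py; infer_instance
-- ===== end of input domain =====

-- B replaces A's nine sequential whole-string .replace passes by one left-to-right scan
-- (two-char digraph window first, else single-char vowel map); objective: a genuinely different single-pass algorithm.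

-- ===== PORT A =====
-- A: lowercase, then nine sequential str.replace passes in dict-insertion order, then wrap in '/'.
def get_phonetic_spelling_py (word : String) : String :=
  let r := PySem.Str.lower word
  let r := PySem.Str.replace r "a" "æ"
  let r := PySem.Str.replace r "e" "ɛ"
  let r := PySem.Str.replace r "i" "ɪ"
  let r := PySem.Str.replace r "o" "ɒ"
  let r := PySem.Str.replace r "u" "ʌ"
  let r := PySem.Str.replace r "th" "θ"
  let r := PySem.Str.replace r "sh" "ʃ"
  let r := PySem.Str.replace r "ch" "tʃ"
  let r := PySem.Str.replace r "ng" "ŋ"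
  String.ofList ('/' :: r.toList ++ ['/'])

-- ===== PORT B =====
-- B's single-char vowel mapping (the inner if/elif chain of Source B).
def pvVowel (c : Char) : Char :=
  if c = 'a' then 'æ'
  else if c = 'e' then 'ɛ'
  else if c = 'i' then 'ɪ'
  else if c = 'o' then 'ɒ'
  else if c = 'u' then 'ʌ'
  else c

-- B's while loop: at each position try the two-char window, else map the single char.
def pvAltScan : List Char → List Char
  | [] => []
  | [c] => [pvVowel c]
  | c1 :: c2 :: t =>
    if c1 = 't' ∧ c2 = 'h' then 'θ' :: pvAltScan t
    else if c1 = 's' ∧ c2 = 'h' then 'ʃ' :: pvAltScan t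
    else if c1 = 'c' ∧ c2 = 'h' then 't' :: 'ʃ' :: pvAltScan t
    else if c1 = 'n' ∧ c2 = 'g' then 'ŋ' :: pvAltScan t
    else pvVowel c1 :: pvAltScan (c2 :: t)
termination_by l => l.length

def get_phonetic_spelling_py_alt (word : String) : String :=
  String.ofList ('/' :: pvAltScan (PySem.Str.lower word).toList ++ ['/'])

-- ===== PRECONDITION & SPEC =====
def Spec_get_phonetic_spelling_py (word : String) (out : String) : Prop := out = get_phonetic_spelling_py_alt word
instance (word : String) (out : String) : Decidable (Spec_get_phonetic_spelling_py word out) := by unfold Spec_get_phonetic_spelling_py; infer_instance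

-- ===== CLAIM (what is proved, stated in full; the proofs are below) =====
def Claim_equal_get_phonetic_spelling_py : Prop := ∀ (word : String), Dom_get_phonetic_spelling_py word → Spec_get_phonetic_spelling_py word (get_phonetic_spelling_py word)

-- ===== LEMMAS AND PROOFS =====

-- One non-overlapping left-to-right pass replacing the 2-char pattern [p1,p2] by r
-- (what str.replace does for a 2-char pattern).
def rep2 (p1 p2 : Char) (r : List Char) : List Char → List Char
  | [] => []
  | [c] => [c]
  | c1 :: c2 :: t => if c1 = p1 ∧ c2 = p2 then r ++ rep2 p1 p2 r t else c1 :: rep2 p1 p2 r (c2 :: t)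
termination_by l => l.length

lemma go_nil (old new : List Char) (fuel : Nat) (acc : List Char) :
    PySem.Chars.replace.go old new fuel [] acc = acc.reverse := by
  cases fuel <;> simp [PySem.Chars.replace.go]

lemma go1 (p r : Char) : ∀ (fuel : Nat) (l acc : List Char), l.length ≤ fuel →
    PySem.Chars.replace.go [p] [r] fuel l acc = acc.reverse ++ l.map (fun c => if c = p then r else c) := by
  intro fuel
  induction fuel with
  | zero =>
    intro l acc h
    cases l with
    | nil => simp [go_nil]
    | cons c t => simp at h
  | succ n ih =>
    intro l acc h
    cases l with
    | nil => simp [go_nil]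
    | cons c t =>
      have ht : t.length ≤ n := by simpa using h
      simp only [PySem.Chars.replace.go]
      by_cases hc : c = p
      · rw [if_pos (by simp [hc]),
          show List.drop [p].length (c :: t) = t by simp,
          ih t _ ht]
        simp [hc]
      · have hnp : ¬ ([p].isPrefixOf (c :: t) = true) := by
          simp only [List.isPrefixOf_iff_prefix, List.cons_prefix_cons]
          rintro ⟨h', -⟩
          exact hc h'.symm
        rw [if_neg hnp, ih t _ ht]
        simp [hc]

lemma go2 (p1 p2 : Char) (r : List Char) : ∀ (fuel : Nat) (l acc : List Char), l.length ≤ fuel →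
    PySem.Chars.replace.go [p1,p2] r fuel l acc = acc.reverse ++ rep2 p1 p2 r l := by
  intro fuel
  induction fuel with
  | zero =>
    intro l acc h
    cases l with
    | nil => simp [go_nil, rep2]
    | cons c t => simp at h
  | succ n ih =>
    intro l acc h
    match l with
    | [] => simp [go_nil, rep2]
    | [c] => simp [PySem.Chars.replace.go, go_nil, rep2]
    | c1 :: c2 :: t =>
      have ht : t.length ≤ n := by simp at h; omega
      have ht2 : (c2 :: t).length ≤ n := by simpa using h
      simp only [PySem.Chars.replace.go]
      by_cases hc : c1 = p1 ∧ c2 = p2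
      · rw [if_pos (by simp [hc.1, hc.2]),
          show List.drop [p1, p2].length (c1 :: c2 :: t) = t by simp,
          ih t _ ht, rep2, if_pos hc]
        simp
      · have hnp : ¬ ([p1, p2].isPrefixOf (c1 :: c2 :: t) = true) := by
          simp only [List.isPrefixOf_iff_prefix, List.cons_prefix_cons]
          rintro ⟨a, b, -⟩
          exact hc ⟨a.symm, b.symm⟩
        rw [if_neg hnp, ih (c2 :: t) _ ht2, rep2, if_neg hc]
        simp

lemma replace_single (p r : Char) (l : List Char) :
    PySem.Chars.replace l [p] [r] = l.map (fun c => if c = p then r else c) := by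
  rw [PySem.Chars.replace, if_neg (by simp), go1 p r l.length l [] le_rfl]
  simp

lemma replace_pair (p1 p2 : Char) (r : List Char) (l : List Char) :
    PySem.Chars.replace l [p1, p2] r = rep2 p1 p2 r l := by
  rw [PySem.Chars.replace, if_neg (by simp), go2 p1 p2 r l.length l [] le_rfl]
  simp

-- The five single-vowel replaces compose to one map of pvVowel.
lemma vowel_chain (l : List Char) :
    ((((l.map (fun c => if c = 'a' then 'æ' else c)).map
        (fun c => if c = 'e' then 'ɛ' else c)).map
        (fun c => if c = 'i' then 'ɪ' else c)).map
        (fun c => if c = 'o' then 'ɒ' else c)).map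
        (fun c => if c = 'u' then 'ʌ' else c) = l.map pvVowel := by
  simp only [List.map_map]
  apply List.map_congr_left
  intro c _
  simp only [Function.comp, pvVowel]
  split_ifs <;> simp_all

-- pvVowel only moves vowels: for a non-vowel, non-vowel-image target d it is the identity test.
lemma pvVowel_eq_iff (c d : Char)
    (hd : d ∉ (['a','e','i','o','u','æ','ɛ','ɪ','ɒ','ʌ'] : List Char)) :
    pvVowel c = d ↔ c = d := by
  simp only [List.mem_cons, List.not_mem_nil, or_false] at hd
  rw [not_or, not_or, not_or, not_or, not_or, not_or, not_or, not_or, not_or] at hd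
  obtain ⟨ha, he, hi, ho, hu, hae, hee, hii, hoo, huu⟩ := hd
  unfold pvVowel
  split_ifs with h1 h2 h3 h4 h5
  · exact iff_of_false (fun x => hae x.symm) (fun x => ha (x.symm.trans h1))
  · exact iff_of_false (fun x => hee x.symm) (fun x => he (x.symm.trans h2))
  · exact iff_of_false (fun x => hii x.symm) (fun x => hi (x.symm.trans h3))
  · exact iff_of_false (fun x => hoo x.symm) (fun x => ho (x.symm.trans h4))
  · exact iff_of_false (fun x => huu x.symm) (fun x => hu (x.symm.trans h5))
  · exact Iff.rfl

lemma rep2_cons (p1 p2 : Char) (r : List Char) (c : Char) (X : List Char)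
    (h : ¬ (c = p1 ∧ X.head? = some p2)) :
    rep2 p1 p2 r (c :: X) = c :: rep2 p1 p2 r X := by
  cases X with
  | nil => simp [rep2]
  | cons d Y =>
    rw [rep2, if_neg]
    simpa using h

-- rep2 of a cons is a cons whose head is the old head or the replacement's head.
lemma rep2_shape (p1 p2 : Char) (a : Char) (s : List Char) (c : Char) (X : List Char) :
    ∃ d T, rep2 p1 p2 (a :: s) (c :: X) = d :: T ∧ (d = c ∨ d = a) := by
  cases X with
  | nil => exact ⟨c, [], by simp [rep2], Or.inl rfl⟩
  | cons e Y =>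
    rw [rep2]
    split_ifs
    · exact ⟨a, _, rfl, Or.inr rfl⟩
    · exact ⟨c, _, rfl, Or.inl rfl⟩

-- Main invariant: the four sequential digraph passes over the vowel-mapped list
-- equal B's single scan.
lemma comp_eq_scan : ∀ l : List Char,
    rep2 'n' 'g' ['ŋ'] (rep2 'c' 'h' ['t','ʃ'] (rep2 's' 'h' ['ʃ']
      (rep2 't' 'h' ['θ'] (l.map pvVowel)))) = pvAltScan l := by
  intro l
  induction l using pvAltScan.induct with
  | case1 => simp [rep2, pvAltScan]
  | case2 c => simp only [List.map_cons, List.map_nil, rep2, pvAltScan]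
  | case3 c1 c2 t h ih =>
    obtain ⟨rfl, rfl⟩ := h
    rw [pvAltScan, if_pos ⟨rfl, rfl⟩]
    simp only [List.map_cons, show pvVowel 't' = 't' from by decide,
      show pvVowel 'h' = 'h' from by decide]
    rw [show rep2 't' 'h' ['θ'] ('t' :: 'h' :: List.map pvVowel t)
        = 'θ' :: rep2 't' 'h' ['θ'] (List.map pvVowel t) from by rw [rep2, if_pos ⟨rfl, rfl⟩]; rfl]
    rw [rep2_cons 's' 'h' _ _ _ (by rintro ⟨x, -⟩; exact absurd x (by decide)),
      rep2_cons 'c' 'h' _ _ _ (by rintro ⟨x, -⟩; exact absurd x (by decide)),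
      rep2_cons 'n' 'g' _ _ _ (by rintro ⟨x, -⟩; exact absurd x (by decide)), ih]
  | case4 c1 c2 t h1 h ih =>
    obtain ⟨rfl, rfl⟩ := h
    rw [pvAltScan, if_neg h1, if_pos ⟨rfl, rfl⟩]
    simp only [List.map_cons, show pvVowel 's' = 's' from by decide,
      show pvVowel 'h' = 'h' from by decide]
    rw [rep2_cons 't' 'h' _ _ _ (by rintro ⟨x, -⟩; exact absurd x (by decide)),
      rep2_cons 't' 'h' _ _ _ (by rintro ⟨x, -⟩; exact absurd x (by decide)),
      show ∀ X, rep2 's' 'h' ['ʃ'] ('s' :: 'h' :: X) = 'ʃ' :: rep2 's' 'h' ['ʃ'] X from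
        fun X => by rw [rep2, if_pos ⟨rfl, rfl⟩]; rfl,
      rep2_cons 'c' 'h' _ _ _ (by rintro ⟨x, -⟩; exact absurd x (by decide)),
      rep2_cons 'n' 'g' _ _ _ (by rintro ⟨x, -⟩; exact absurd x (by decide)), ih]
  | case5 c1 c2 t h1 h2 h ih =>
    obtain ⟨rfl, rfl⟩ := h
    rw [pvAltScan, if_neg h1, if_neg h2, if_pos ⟨rfl, rfl⟩]
    simp only [List.map_cons, show pvVowel 'c' = 'c' from by decide,
      show pvVowel 'h' = 'h' from by decide]
    rw [rep2_cons 't' 'h' _ _ _ (by rintro ⟨x, -⟩; exact absurd x (by decide)),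
      rep2_cons 't' 'h' _ _ _ (by rintro ⟨x, -⟩; exact absurd x (by decide)),
      rep2_cons 's' 'h' _ _ _ (by rintro ⟨x, -⟩; exact absurd x (by decide)),
      rep2_cons 's' 'h' _ _ _ (by rintro ⟨x, -⟩; exact absurd x (by decide)),
      show ∀ X, rep2 'c' 'h' ['t','ʃ'] ('c' :: 'h' :: X) = 't' :: 'ʃ' :: rep2 'c' 'h' ['t','ʃ'] X from
        fun X => by rw [rep2, if_pos ⟨rfl, rfl⟩]; rfl,
      rep2_cons 'n' 'g' _ _ _ (by rintro ⟨x, -⟩; exact absurd x (by decide)),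
      rep2_cons 'n' 'g' _ _ _ (by rintro ⟨x, -⟩; exact absurd x (by decide)), ih]
  | case6 c1 c2 t h1 h2 h3 h ih =>
    obtain ⟨rfl, rfl⟩ := h
    rw [pvAltScan, if_neg h1, if_neg h2, if_neg h3, if_pos ⟨rfl, rfl⟩]
    simp only [List.map_cons, show pvVowel 'n' = 'n' from by decide,
      show pvVowel 'g' = 'g' from by decide]
    rw [rep2_cons 't' 'h' _ _ _ (by rintro ⟨x, -⟩; exact absurd x (by decide)),
      rep2_cons 't' 'h' _ _ _ (by rintro ⟨x, -⟩; exact absurd x (by decide)),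
      rep2_cons 's' 'h' _ _ _ (by rintro ⟨x, -⟩; exact absurd x (by decide)),
      rep2_cons 's' 'h' _ _ _ (by rintro ⟨x, -⟩; exact absurd x (by decide)),
      rep2_cons 'c' 'h' _ _ _ (by rintro ⟨x, -⟩; exact absurd x (by decide)),
      rep2_cons 'c' 'h' _ _ _ (by rintro ⟨x, -⟩; exact absurd x (by decide)),
      show ∀ X, rep2 'n' 'g' ['ŋ'] ('n' :: 'g' :: X) = 'ŋ' :: rep2 'n' 'g' ['ŋ'] X from
        fun X => by rw [rep2, if_pos ⟨rfl, rfl⟩]; rfl, ih]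
  | case7 c1 c2 t h1 h2 h3 h4 ih =>
    have vt := fun c => pvVowel_eq_iff c 't' (by decide)
    have vs := fun c => pvVowel_eq_iff c 's' (by decide)
    have vc := fun c => pvVowel_eq_iff c 'c' (by decide)
    have vn := fun c => pvVowel_eq_iff c 'n' (by decide)
    have vh := fun c => pvVowel_eq_iff c 'h' (by decide)
    have vg := fun c => pvVowel_eq_iff c 'g' (by decide)
    rw [pvAltScan, if_neg h1, if_neg h2, if_neg h3, if_neg h4]
    simp only [List.map_cons] at ih ⊢
    obtain ⟨d1, T1, hS1, hd1⟩ := rep2_shape 't' 'h' 'θ' [] (pvVowel c2) (List.map pvVowel t)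
    obtain ⟨d2, T2, hS2, hd2⟩ := rep2_shape 's' 'h' 'ʃ' [] d1 T1
    obtain ⟨d3, T3, hS3, hd3⟩ := rep2_shape 'c' 'h' 't' ['ʃ'] d2 T2
    rw [rep2_cons 't' 'h' _ _ _ (by
        rintro ⟨x, y⟩
        simp only [List.head?_cons, Option.some.injEq] at y
        exact h1 ⟨(vt c1).mp x, (vh c2).mp y⟩), hS1]
    rw [rep2_cons 's' 'h' _ _ _ (by
        rintro ⟨x, y⟩
        simp only [List.head?_cons, Option.some.injEq] at y
        subst y
        rcases hd1 with h | h
        · exact h2 ⟨(vs c1).mp x, (vh c2).mp h.symm⟩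
        · exact absurd h (by decide)), hS2]
    rw [rep2_cons 'c' 'h' _ _ _ (by
        rintro ⟨x, y⟩
        simp only [List.head?_cons, Option.some.injEq] at y
        subst y
        rcases hd2 with h | h
        · rcases h ▸ hd1 with h' | h'
          · exact h3 ⟨(vc c1).mp x, (vh c2).mp h'.symm⟩
          · exact absurd h' (by decide)
        · exact absurd h (by decide)), hS3]
    rw [rep2_cons 'n' 'g' _ _ _ (by
        rintro ⟨x, y⟩
        simp only [List.head?_cons, Option.some.injEq] at y
        subst y
        rcases hd3 with h | h
        · rcases h ▸ hd2 with h' | h'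
          · rcases h' ▸ hd1 with h'' | h''
            · exact h4 ⟨(vn c1).mp x, (vg c2).mp h''.symm⟩
            · exact absurd h'' (by decide)
          · exact absurd h' (by decide)
        · exact absurd h (by decide))]
    rw [← hS3, ← hS2, ← hS1, ih]

-- ===== VERDICT (by name: the statement is the Claim_ definition above) =====
theorem get_phonetic_spelling_py_spec : Claim_equal_get_phonetic_spelling_py := by
  intro word _
  simp only [Spec_get_phonetic_spelling_py, get_phonetic_spelling_py, get_phonetic_spelling_py_alt]
  refine congrArg String.ofList ?_
  have hA : ("a" : String).toList = ['a'] := rfl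
  have hE : ("e" : String).toList = ['e'] := rfl
  have hI : ("i" : String).toList = ['i'] := rfl
  have hO : ("o" : String).toList = ['o'] := rfl
  have hU : ("u" : String).toList = ['u'] := rfl
  have hAE : ("æ" : String).toList = ['æ'] := rfl
  have hEE : ("ɛ" : String).toList = ['ɛ'] := rfl
  have hII : ("ɪ" : String).toList = ['ɪ'] := rfl
  have hOO : ("ɒ" : String).toList = ['ɒ'] := rfl
  have hUU : ("ʌ" : String).toList = ['ʌ'] := rfl
  have hTH : ("th" : String).toList = ['t','h'] := rfl
  have hSH : ("sh" : String).toList = ['s','h'] := rfl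
  have hCH : ("ch" : String).toList = ['c','h'] := rfl
  have hNG : ("ng" : String).toList = ['n','g'] := rfl
  have hTHs : ("θ" : String).toList = ['θ'] := rfl
  have hSHs : ("ʃ" : String).toList = ['ʃ'] := rfl
  have hCHs : ("tʃ" : String).toList = ['t','ʃ'] := rfl
  have hNGs : ("ŋ" : String).toList = ['ŋ'] := rfl
  simp only [PySem.Str.toList_replace, hA, hE, hI, hO, hU, hAE, hEE, hII, hOO, hUU,
    hTH, hSH, hCH, hNG, hTHs, hSHs, hCHs, hNGs,
    replace_single, replace_pair, vowel_chain, comp_eq_scan]
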